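-- pv_equiv track=rewrite | github.com/Jack-Hall/MiscPythonStuff | multiset generator.py | addBreaks
-- ===== SOURCE A (Python) =====
-- def addBreaks(sets, t):
--     if(t == 0):
--         return [sets]
--     if(len(sets) == t):
--         for i in range(len(sets)):
--             sets[i] = 'O'
--         return [sets]
--
--     else:
--         return ([['X'] + n for n in addBreaks(sets[1:], t)] +
--     [['O'] + n for n in addBreaks(sets[1:],t - 1)])
-- ===== SOURCE B (Python) =====
-- def addBreaks(sets, t):
--     if t == 0:
--         return [sets]
--     rows = []
--     for p in reversed(range(len(sets) - t + 1)):
--         for r in addBreaks(sets[p + 1:], t - 1):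
--             rows.append(['X'] * p + ['O'] + r)
--     return rows
-- ===== Notes on version B (the rewrite author's own statement) =====
-- stated objective: simpler
-- what changed: B replaces A's per-element binary recursion (X-branch/O-branch with list slicing at every element) by a single loop over the position of the first 'O' mark, recursing only t levels deep on the remaining marks.
import Mathlib
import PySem

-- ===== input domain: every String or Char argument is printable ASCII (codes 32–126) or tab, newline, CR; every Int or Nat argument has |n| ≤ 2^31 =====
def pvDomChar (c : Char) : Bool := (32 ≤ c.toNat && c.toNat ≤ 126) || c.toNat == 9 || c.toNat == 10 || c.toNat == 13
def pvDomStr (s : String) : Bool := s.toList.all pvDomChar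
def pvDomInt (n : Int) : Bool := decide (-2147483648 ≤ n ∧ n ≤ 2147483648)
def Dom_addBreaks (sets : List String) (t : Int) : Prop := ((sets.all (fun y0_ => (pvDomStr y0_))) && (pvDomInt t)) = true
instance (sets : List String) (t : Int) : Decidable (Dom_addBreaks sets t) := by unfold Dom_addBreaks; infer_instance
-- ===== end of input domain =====

-- B replaces A's per-element X/O binary recursion by a loop over the position of the first 'O'
-- mark (recursion only t levels deep); return-value equivalence only: A mutates `sets` in place
-- when 0 < t = len(sets), B never mutates its argument.

-- ===== PORT A =====
def addBreaks (sets : List String) (t : Int) : List (List String) :=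
  if t = 0 then [sets]
  else if (sets.length : Int) = t then
    -- for i in range(len(sets)): sets[i] = 'O'
    [(List.range sets.length).foldl (fun s i => s.set i "O") sets]
  else
    match sets with
    | [] => []  -- Python recurses forever here (RecursionError); totalization guard, outside Pre_
    | _ :: rest =>  -- sets[1:] = rest since sets is nonempty
      ((addBreaks rest t).map (fun n => "X" :: n)) ++
      ((addBreaks rest (t - 1)).map (fun n => "O" :: n))

-- ===== PORT B =====
def addBreaks_alt (sets : List String) (t : Int) : List (List String) :=
  if t = 0 then [sets]
  else if t < 0 then []  -- Python recurses forever here (RecursionError); totalization guard, outside Pre_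
  else
    -- for p in reversed(range(len(sets) - t + 1)): for r in addBreaks(sets[p+1:], t-1): rows.append(['X']*p + ['O'] + r)
    (List.range ((sets.length : Int) - t + 1).toNat).reverse.foldl
      (fun rows p =>
        rows ++ (addBreaks_alt (sets.drop (p + 1)) (t - 1)).map
          (fun r => List.replicate p "X" ++ "O" :: r)) []
termination_by t.toNat
decreasing_by
  rename_i h0 hneg
  omega

-- ===== PRECONDITION & SPEC =====
-- Pre_ excludes exactly the inputs (t < 0 or t > len(sets)) on which A recurses forever and
-- raises RecursionError; A returns normally on every input admitted here.
def Pre_addBreaks (sets : List String) (t : Int) : Prop := 0 ≤ t ∧ t ≤ (sets.length : Int)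
instance (sets : List String) (t : Int) : Decidable (Pre_addBreaks sets t) := by unfold Pre_addBreaks; infer_instance
def pvWitness_addBreaks : List String × Int := (["a", "b", "c"], 1)

def Spec_addBreaks (sets : List String) (t : Int) (out : List (List String)) : Prop := out = addBreaks_alt sets t
instance (sets : List String) (t : Int) (out : List (List String)) : Decidable (Spec_addBreaks sets t out) := by unfold Spec_addBreaks; infer_instance

-- ===== CLAIM (what is proved, stated in full; the proofs are below) =====
def Claim_equal_addBreaks : Prop := ∀ (sets : List String) (t : Int), Dom_addBreaks sets t → Pre_addBreaks sets t → Spec_addBreaks sets t (addBreaks sets t)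

-- ===== LEMMAS AND PROOFS =====

-- the body of B's inner loop, as a function of the first-'O' position p
def blockB (sets : List String) (t : Int) (p : Nat) : List (List String) :=
  (addBreaks_alt (sets.drop (p + 1)) (t - 1)).map (fun r => List.replicate p "X" ++ "O" :: r)

theorem foldl_app {α β : Type} (f : α → List β) :
    ∀ (l : List α) (init : List β),
      l.foldl (fun acc x => acc ++ f x) init = init ++ l.flatMap f := by
  intro l
  induction l with
  | nil => intro init; simp
  | cons a l ih => intro init; simp [List.foldl, ih]

theorem alt_unfold (sets : List String) (t : Int) (h0 : t ≠ 0) (hpos : 0 < t) :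
    addBreaks_alt sets t
      = (List.range ((sets.length : Int) - t + 1).toNat).reverse.flatMap (blockB sets t) := by
  rw [addBreaks_alt]
  rw [if_neg h0, if_neg (by omega)]
  rw [foldl_app]
  simp only [List.nil_append]
  rfl

theorem setRange_replicate :
    ∀ (k : Nat) (sets : List String), k ≤ sets.length →
      (List.range k).foldl (fun s i => s.set i "O") sets
        = List.replicate k "O" ++ sets.drop k := by
  intro k
  induction k with
  | zero => intro sets _; simp
  | succ k ih =>
    intro sets hk
    rw [List.range_succ, List.foldl_append, ih sets (by omega)]
    have hlt : k < sets.length := by omega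
    rw [List.drop_eq_getElem_cons hlt]
    have hset : (List.replicate k "O" ++ sets[k] :: sets.drop (k + 1)).set k "O"
        = List.replicate k "O" ++ "O" :: sets.drop (k + 1) := by
      rw [List.set_append_right _ _ (by simp)]
      simp only [List.length_replicate, Nat.sub_self, List.set_cons_zero]
    simp only [List.foldl_cons, List.foldl_nil]
    rw [hset, List.replicate_succ', List.append_assoc]
    rfl

theorem alt_allO :
    ∀ (n : Nat) (sets : List String), sets.length = n → 0 < n →
      addBreaks_alt sets (n : Int) = [List.replicate n "O"] := by
  intro n
  induction n with
  | zero => intro sets _ h; omega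
  | succ n ih =>
    intro sets hlen _
    rw [alt_unfold _ _ (by omega) (by omega)]
    have hK : (((sets.length : Int) - (n + 1 : Nat) + 1).toNat) = 1 := by
      rw [hlen]; omega
    rw [hK]
    simp only [List.range_one, List.reverse_singleton, List.flatMap_cons, List.flatMap_nil,
      List.append_nil, blockB]
    have hd : (sets.drop (0 + 1)).length = n := by simp [hlen]
    by_cases hn : n = 0
    · subst hn
      have : sets.drop 1 = [] := List.eq_nil_of_length_eq_zero (by simpa using hd)
      simp [this, addBreaks_alt, List.replicate]
    · have : ((n + 1 : Nat) : Int) - 1 = (n : Int) := by push_cast; ring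
      rw [this, ih (sets.drop (0 + 1)) hd (by omega)]
      simp [List.replicate_succ]

theorem alt_step (s : String) (rest : List String) (t : Int)
    (hpos : 0 < t) (hle : t ≤ (rest.length : Int)) :
    addBreaks_alt (s :: rest) t
      = ((addBreaks_alt rest t).map (fun n => "X" :: n))
        ++ ((addBreaks_alt rest (t - 1)).map (fun n => "O" :: n)) := by
  rw [alt_unfold _ _ (by omega) hpos]
  have hK : ((((s :: rest).length : Int) - t + 1).toNat) = ((rest.length : Int) - t + 1).toNat + 1 := by
    simp only [List.length_cons]
    omega
  rw [hK]
  set k := ((rest.length : Int) - t + 1).toNat with hkdef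
  rw [List.range_succ_eq_map]
  simp only [List.reverse_cons]
  rw [List.flatMap_append]
  have hblock : ∀ p : Nat, blockB (s :: rest) t (p + 1)
      = (blockB rest t p).map (fun n => "X" :: n) := by
    intro p
    simp [blockB, List.replicate_succ, Function.comp]
  have h1 : ((List.range k).map Nat.succ).reverse.flatMap (blockB (s :: rest) t)
      = ((List.range k).reverse.flatMap (blockB rest t)).map (fun n => "X" :: n) := by
    rw [← List.map_reverse, List.flatMap_map, List.map_flatMap]
    refine List.flatMap_congr ?_
    intro p _
    exact hblock p
  rw [h1]
  have h0 : blockB (s :: rest) t 0 = (addBreaks_alt rest (t - 1)).map (fun n => "O" :: n) := by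
    simp [blockB]
  rw [← alt_unfold rest t (by omega) hpos] at *
  simp [h0]

theorem main_eq :
    ∀ (n : Nat) (sets : List String) (t : Int), sets.length = n → 0 ≤ t → t ≤ (n : Int) →
      addBreaks sets t = addBreaks_alt sets t := by
  intro n
  induction n with
  | zero =>
    intro sets t hlen h0 h1
    have ht : t = 0 := by omega
    subst ht
    rw [addBreaks.eq_def, addBreaks_alt]
    simp
  | succ n ih =>
    intro sets t hlen h0 h1
    by_cases ht0 : t = 0
    · subst ht0
      rw [addBreaks.eq_def, addBreaks_alt]
      simp
    · by_cases hteq : (sets.length : Int) = t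
      · -- all-'O' case
        rw [addBreaks.eq_def, if_neg ht0, if_pos hteq]
        rw [setRange_replicate sets.length sets le_rfl]
        have : (t : Int) = ((n + 1 : Nat) : Int) := by rw [← hteq, hlen]
        rw [this, alt_allO (n + 1) sets hlen (by omega)]
        simp [hlen]
      · -- 0 < t < length
        obtain ⟨s, rest, rfl⟩ : ∃ s rest, sets = s :: rest := by
          cases sets with
          | nil => simp at hlen
          | cons a l => exact ⟨a, l, rfl⟩
        have hrl : rest.length = n := by simpa using hlen
        have htlt : t ≤ (n : Int) := by
          simp only [List.length_cons, hrl] at hteq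
          omega
        rw [addBreaks.eq_def, if_neg ht0, if_neg hteq]
        simp only []
        rw [ih rest t hrl (by omega) htlt,
            ih rest (t - 1) hrl (by omega) (by omega)]
        rw [alt_step s rest t (by omega) (by rw [hrl]; exact htlt)]

-- ===== VERDICT (by name: the statement is the Claim_ definition above) =====
theorem addBreaks_spec : Claim_equal_addBreaks := by
  intro sets t _ hpre
  unfold Spec_addBreaks
  exact main_eq sets.length sets t rfl hpre.1 hpre.2
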